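-- pv_equiv track=rewrite | github.com/znamlab/multi_padlock_design | multi_padlock_design/blast/readblast.py | split_arms
-- ===== SOURCE A (Python) =====
-- def split_arms(query, subject, ligation_site, start_pos):
--     """
--     Split query and subject into left/right arms,using the ligation site relative to the
--     original ungapped 40bp query. Gaps ('-') in the query do not count toward the split
--     position, but are preserved in the output strings. The subject is split at the same
--     character index as the query to preserve alignment.
--
--     Args:
--         query (str): Query sequence (may contain '-')
--         subject (str): Subject sequence (may contain '-')
--         ligation_site (int): 1-based ligation site position
--         in the original 40bp sequence
--         start_pos (int): 1-based start position of this query segment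
--         relative to the original 40bp
--
--     Returns:
--         tuple[str, str, str, str]:
--         (query_left, query_right, subject_left, subject_right)
--     """
--     # Number of non-gap bases from the start of the query to include in the left arm
--     split_point = ligation_site - start_pos
--
--     # Fast paths
--     if split_point <= 0:
--         # Entire fragment lies to the right of the ligation site
--         return "", query, "", subject
--
--     # Count total non-gap characters in query
--     total_non_gaps = sum(1 for c in query if c != "-")
--     if split_point >= total_non_gaps:
--         # Entire fragment is on/left of the ligation site
--         return query, "", subject, ""
--
--     # Find the character index in the query where the non-gap count reaches split_point
--     non_gap_count = 0
--     split_idx = 0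
--     for i, ch in enumerate(query):
--         if ch != "-":
--             non_gap_count += 1
--         if non_gap_count == split_point:
--             split_idx = i + 1  # include this character in the left arm
--             break
--
--     q_left = query[:split_idx]
--     q_right = query[split_idx:]
--     s_left = subject[:split_idx]
--     s_right = subject[split_idx:]
--     return q_left, q_right, s_left, s_right
-- ===== SOURCE B (Python) =====
-- def split_arms(query, subject, ligation_site, start_pos):
--     split_point = ligation_site - start_pos
--     if split_point <= 0:
--         return "", query, "", subject
--     # Index table of non-gap character positions: one pass, then O(1) lookup.
--     non_gaps = [i for i, c in enumerate(query) if c != "-"]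
--     if split_point >= len(non_gaps):
--         return query, "", subject, ""
--     split_idx = non_gaps[split_point - 1] + 1
--     return (query[:split_idx], query[split_idx:],
--             subject[:split_idx], subject[split_idx:])
-- ===== Notes on version B (the rewrite author's own statement) =====
-- stated objective: simpler
-- what changed: Replaces A's scan-with-running-counter-and-break plus separate total-count pass by a single non-gap position index table: the total is its length and the split index is one O(1) lookup non_gaps[split_point-1]+1.
import Mathlib
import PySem

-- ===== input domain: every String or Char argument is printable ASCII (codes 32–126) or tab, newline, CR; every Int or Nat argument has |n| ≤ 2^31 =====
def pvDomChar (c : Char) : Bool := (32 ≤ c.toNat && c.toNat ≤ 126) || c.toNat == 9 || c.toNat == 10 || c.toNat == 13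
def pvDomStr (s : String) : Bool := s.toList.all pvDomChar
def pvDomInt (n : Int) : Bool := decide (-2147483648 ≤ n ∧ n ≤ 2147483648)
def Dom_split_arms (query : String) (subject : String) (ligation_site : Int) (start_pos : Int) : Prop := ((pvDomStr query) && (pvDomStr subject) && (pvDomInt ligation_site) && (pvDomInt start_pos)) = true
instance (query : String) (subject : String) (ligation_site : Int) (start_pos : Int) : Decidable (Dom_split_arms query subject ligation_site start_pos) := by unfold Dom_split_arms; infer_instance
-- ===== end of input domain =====

-- B replaces A's counter-scan-with-break (plus a separate total-count pass) by one
-- index table of non-gap positions with a direct lookup; objective: simpler.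

-- ===== PORT A =====
-- A's 'for i, ch in enumerate(query): …' loop with break: split_idx starts at 0 and is
-- returned unchanged if the loop never breaks (unreachable in A's guarded branch).
def splitLoopA : List (Int × Char) → Int → Int → Int → Int
  | [], _, _, split_idx => split_idx
  | (i, ch) :: rest, non_gap_count, split_point, split_idx =>
    let non_gap_count' := if ch ≠ '-' then non_gap_count + 1 else non_gap_count
    if non_gap_count' = split_point then i + 1
    else splitLoopA rest non_gap_count' split_point split_idx

def split_arms (query : String) (subject : String) (ligation_site : Int) (start_pos : Int) : String × String × String × String :=
  let split_point := ligation_site - start_pos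
  if split_point ≤ 0 then ("", query, "", subject)
  else
    -- total_non_gaps = sum(1 for c in query if c != "-")
    let total_non_gaps := query.toList.foldl (fun acc c => if c ≠ '-' then acc + 1 else acc) (0 : Int)
    if split_point ≥ total_non_gaps then (query, "", subject, "")
    else
      let split_idx := splitLoopA (PySem.List.enumerate query.toList 0) 0 split_point 0
      (PySem.Str.slice query none (some split_idx),
       PySem.Str.slice query (some split_idx) none,
       PySem.Str.slice subject none (some split_idx),
       PySem.Str.slice subject (some split_idx) none)

-- ===== PORT B =====
def split_arms_alt (query : String) (subject : String) (ligation_site : Int) (start_pos : Int) : String × String × String × String :=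
  let split_point := ligation_site - start_pos
  if split_point ≤ 0 then ("", query, "", subject)
  else
    -- non_gaps = [i for i, c in enumerate(query) if c != "-"]
    let non_gaps := ((PySem.List.enumerate query.toList 0).filter (fun p => p.2 ≠ '-')).map (·.1)
    if split_point ≥ (non_gaps.length : Int) then (query, "", subject, "")
    else
      -- non_gaps[split_point - 1]: the index is in range here (0 < split_point < len),
      -- so Python never raises; .getD 0 only discharges the Option.
      let split_idx := (PySem.List.pyGet? non_gaps (split_point - 1)).getD 0 + 1
      (PySem.Str.slice query none (some split_idx),
       PySem.Str.slice query (some split_idx) none,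
       PySem.Str.slice subject none (some split_idx),
       PySem.Str.slice subject (some split_idx) none)

-- ===== PRECONDITION & SPEC =====
def Spec_split_arms (query : String) (subject : String) (ligation_site : Int) (start_pos : Int) (out : String × String × String × String) : Prop := out = split_arms_alt query subject ligation_site start_pos
instance (query : String) (subject : String) (ligation_site : Int) (start_pos : Int) (out : String × String × String × String) : Decidable (Spec_split_arms query subject ligation_site start_pos out) := by unfold Spec_split_arms; infer_instance

-- ===== CLAIM (what is proved, stated in full; the proofs are below) =====
def Claim_equal_split_arms : Prop := ∀ (query : String) (subject : String) (ligation_site : Int) (start_pos : Int), Dom_split_arms query subject ligation_site start_pos → Spec_split_arms query subject ligation_site start_pos (split_arms query subject ligation_site start_pos)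

-- ===== LEMMAS AND PROOFS =====

-- A's total-count pass equals the length of B's non-gap index table.
lemma total_eq (l : List Char) : ∀ (s acc : Int),
    l.foldl (fun a c => if c ≠ '-' then a + 1 else a) acc
      = acc + ((((PySem.List.enumerate l s).filter (fun p => p.2 ≠ '-')).map (·.1)).length : Int) := by
  induction l with
  | nil => intro s acc; simp [PySem.List.enumerate]
  | cons c rest ih =>
    intro s acc
    rw [PySem.List.enumerate_cons, List.foldl_cons]
    by_cases hc : c = '-'
    · rw [if_neg (by simp [hc]), List.filter_cons_of_neg (by simp [hc]), ih (s + 1)]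
    · rw [if_pos hc, List.filter_cons_of_pos (by simp [hc]), List.map_cons, List.length_cons,
        ih (s + 1)]
      push_cast
      ring

-- A's break-on-count loop returns exactly (index table)[j] + 1 where j = split_point - cnt - 1.
lemma splitLoopA_eq (l : List Char) : ∀ (s cnt spt : Int) (j : Nat),
    spt = cnt + 1 + j →
    j < (((PySem.List.enumerate l s).filter (fun p => p.2 ≠ '-')).map (·.1)).length →
    splitLoopA (PySem.List.enumerate l s) cnt spt 0
      = (((PySem.List.enumerate l s).filter (fun p => p.2 ≠ '-')).map (·.1)).getD j 0 + 1 := by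
  induction l with
  | nil => intro s cnt spt j hj hlt; simp [PySem.List.enumerate] at hlt
  | cons c rest ih =>
    intro s cnt spt j hj hlt
    rw [PySem.List.enumerate_cons] at *
    by_cases hc : c = '-'
    · have hne : ¬ (cnt = spt) := by omega
      have := ih (s + 1) cnt spt j hj (by simpa [hc] using hlt)
      simpa [splitLoopA, hc, hne] using this
    · rcases Nat.eq_zero_or_pos j with hj0 | hjpos
      · subst hj0
        have heq : cnt + 1 = spt := by omega
        simp [splitLoopA, hc, heq]
      · obtain ⟨k, rfl⟩ : ∃ k, j = k + 1 := ⟨j - 1, by omega⟩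
        have hne : ¬ (cnt + 1 = spt) := by omega
        have hlt' : k < (((PySem.List.enumerate rest (s + 1)).filter (fun p => p.2 ≠ '-')).map (·.1)).length := by
          rw [List.filter_cons_of_pos (by simp [hc]), List.map_cons, List.length_cons] at hlt
          omega
        have := ih (s + 1) (cnt + 1) spt k (by omega) hlt'
        simpa [splitLoopA, hc, hne] using this

-- ===== VERDICT (by name: the statement is the Claim_ definition above) =====
theorem split_arms_spec : Claim_equal_split_arms := by
  intro query subject ligation_site start_pos _
  simp only [Spec_split_arms, split_arms, split_arms_alt]
  set spt := ligation_site - start_pos with hspt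
  by_cases h0 : spt ≤ 0
  · rw [if_pos h0, if_pos h0]
  · rw [if_neg h0, if_neg h0]
    have htot : query.toList.foldl (fun acc c => if c ≠ '-' then acc + 1 else acc) (0 : Int)
        = ((((PySem.List.enumerate query.toList 0).filter (fun p => p.2 ≠ '-')).map (·.1)).length : Int) := by
      rw [total_eq query.toList 0 0]; omega
    rw [htot]
    set ng := (((PySem.List.enumerate query.toList 0).filter (fun p => p.2 ≠ '-')).map (·.1)) with hng
    by_cases h2 : spt ≥ (ng.length : Int)
    · rw [if_pos h2, if_pos h2]
    · rw [if_neg h2, if_neg h2]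
      obtain ⟨j, hj⟩ : ∃ j : Nat, spt = 1 + (j : Int) := ⟨(spt - 1).toNat, by omega⟩
      have hjlt : j < ng.length := by omega
      have hA := splitLoopA_eq query.toList 0 0 spt j (by omega) (hng ▸ hjlt)
      rw [← hng] at hA
      have hB : (PySem.List.pyGet? ng (spt - 1)).getD 0 + 1 = ng.getD j 0 + 1 := by
        have h1 : spt - 1 = (j : Int) := by omega
        rw [h1, PySem.List.pyGet?_natCast, List.getD_eq_getElem?_getD]
      rw [hA, hB]
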